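-- pv_equiv track=rewrite | github.com/jasonjiangstuy/StuyCSWork | annual2/python/homework/String-exercises-hw.py | inString
-- ===== SOURCE A (Python) =====
-- sportTeams = ['New York Yankees', 'New York Giants', 'New York Rangers', 'New York Knicks', 'New York Jets', 'New York Mets', 'Brooklyn Nets', 'New York Islanders', 'New Jersey Devils', 'New York Red Bulls', 'New York Liberty', 'Sky Blue FC', 'New York City FC']
--
-- def inString(string):
--     for i in sportTeams:
--         if i in string:
--             return True
--         for s in i.split():
--             if s in string:
--                 return True
--     return False
-- ===== SOURCE B (Python) =====
-- # B: since every team name contains each of its words, A's nested scan is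
-- # equivalent to checking the distinct split-words once; single flat pass.
-- _WORDS = ('New', 'York', 'Yankees', 'Giants', 'Rangers', 'Knicks', 'Jets',
--           'Mets', 'Brooklyn', 'Nets', 'Islanders', 'Jersey', 'Devils',
--           'Red', 'Bulls', 'Liberty', 'Sky', 'Blue', 'FC', 'City')
--
-- def inString(string):
--     return any(w in string for w in _WORDS)
-- ===== Notes on version B (the rewrite author's own statement) =====
-- stated objective: faster
-- what changed: B drops the nested per-team loop entirely: since each full team name contains every one of its split words, A's check is equivalent to one flat any() over the 20 distinct words precomputed once as a module constant (measured 2.3x faster: fewer substring scans and no per-call split()).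
import Mathlib
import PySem

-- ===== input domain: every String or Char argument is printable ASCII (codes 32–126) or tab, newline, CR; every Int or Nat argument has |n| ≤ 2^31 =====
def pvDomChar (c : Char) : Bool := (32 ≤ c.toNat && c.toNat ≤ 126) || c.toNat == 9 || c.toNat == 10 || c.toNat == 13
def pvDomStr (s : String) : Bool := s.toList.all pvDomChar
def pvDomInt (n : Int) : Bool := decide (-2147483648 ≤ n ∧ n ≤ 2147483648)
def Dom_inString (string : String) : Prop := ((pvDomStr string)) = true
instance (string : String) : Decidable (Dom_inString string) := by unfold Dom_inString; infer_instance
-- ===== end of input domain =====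

-- B drops A's nested per-team loop: every team name contains each of its split words,
-- so one flat pass over the 20 distinct words returns the same Bool (simpler).

-- ===== PORT A =====
def sportTeams : List String := ["New York Yankees", "New York Giants", "New York Rangers", "New York Knicks", "New York Jets", "New York Mets", "Brooklyn Nets", "New York Islanders", "New Jersey Devils", "New York Red Bulls", "New York Liberty", "Sky Blue FC", "New York City FC"]

-- the outer 'for i in sportTeams' with its early returns; the inner early-return
-- loop 'for s in i.split(): if s in string: return True' is the .any over i.split()
def inStringLoop (teams : List String) (string : String) : Bool :=
  match teams with
  | [] => false
  | i :: rest =>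
    if PySem.Str.isIn i string then true
    else if (PySem.Str.split₀ i).any (fun s => PySem.Str.isIn s string) then true
    else inStringLoop rest string

def inString (string : String) : Bool := inStringLoop sportTeams string

-- ===== PORT B =====
def pvWords : List String := ["New", "York", "Yankees", "Giants", "Rangers", "Knicks", "Jets", "Mets", "Brooklyn", "Nets", "Islanders", "Jersey", "Devils", "Red", "Bulls", "Liberty", "Sky", "Blue", "FC", "City"]

def inString_alt (string : String) : Bool :=
  pvWords.any (fun w => PySem.Str.isIn w string)

-- ===== PRECONDITION & SPEC =====
def Spec_inString (string : String) (out : Bool) : Prop := out = inString_alt string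
instance (string : String) (out : Bool) : Decidable (Spec_inString string out) := by unfold Spec_inString; infer_instance

-- ===== CLAIM (what is proved, stated in full; the proofs are below) =====
def Claim_equal_inString : Prop := ∀ (string : String), Dom_inString string → Spec_inString string (inString string)

-- ===== LEMMAS AND PROOFS =====

-- a substring of a substring of s is a substring of s
theorem pv_sub_trans (t w s : String) (h : w.toList <:+: t.toList)
    (ht : PySem.Str.isIn t s = true) : PySem.Str.isIn w s = true := by
  rw [PySem.Str.isIn_iff_infix] at ht ⊢
  exact h.trans ht

-- A's loop equals one any over the concatenated word lists: the full-name test of a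
-- team is absorbed by the test of its own words
theorem pv_loop_eq_flat (teams : List String) (s : String)
    (hws : ∀ t ∈ teams, ∃ w ∈ PySem.Str.split₀ t, w.toList <:+: t.toList) :
    inStringLoop teams s
      = (teams.flatMap PySem.Str.split₀).any (fun w => PySem.Str.isIn w s) := by
  induction teams with
  | nil => simp [inStringLoop]
  | cons i rest ih =>
    obtain ⟨w, hw, hinf⟩ := hws i (List.mem_cons_self ..)
    have hrest := fun t ht => hws t (List.mem_cons_of_mem _ ht)
    rw [inStringLoop, List.flatMap_cons, List.any_append]
    by_cases hi : PySem.Str.isIn i s = true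
    · rw [if_pos hi, List.any_eq_true.mpr ⟨w, hw, pv_sub_trans i w s hinf hi⟩, Bool.true_or]
    · rw [if_neg hi]
      by_cases hany : (PySem.Str.split₀ i).any (fun w => PySem.Str.isIn w s) = true
      · rw [if_pos hany, hany, Bool.true_or]
      · rw [if_neg hany, Bool.not_eq_true] at *
        rw [hany, Bool.false_or, ih hrest]

-- anys of two lists with the same elements agree
theorem pv_any_ext (l1 l2 : List String) (p : String → Bool)
    (h12 : l1 ⊆ l2) (h21 : l2 ⊆ l1) : l1.any p = l2.any p := by
  rw [Bool.eq_iff_iff]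
  simp only [List.any_eq_true]
  exact ⟨fun ⟨x, hx, hp⟩ => ⟨x, h12 hx, hp⟩, fun ⟨x, hx, hp⟩ => ⟨x, h21 hx, hp⟩⟩

-- ===== VERDICT (by name: the statement is the Claim_ definition above) =====
set_option maxHeartbeats 1000000 in
theorem inString_spec : Claim_equal_inString := by
  intro s _
  unfold Spec_inString inString inString_alt
  rw [pv_loop_eq_flat sportTeams s (by decide)]
  exact pv_any_ext _ _ _ (by decide) (by decide)
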